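-- pv_equiv track=rewrite | github.com/lilychisholm/Python-GT | HW09.py | secretLocation
-- ===== SOURCE A (Python) =====
-- def secretLocation(location):
--     if len(location) == 0:
--         return ""
--     else:
--         if location[0] in "abcdefghijklmnopqrstuvwxyz" or location[0] == " ":
--             return location[0] + secretLocation(location[1:])
--         else:
--             return secretLocation(location[1:])
-- ===== SOURCE B (Python) =====
-- def secretLocation(location):
--     result = ""
--     for ch in location:
--         if ch in "abcdefghijklmnopqrstuvwxyz" or ch == " ":
--             result = result + ch
--     return result
-- ===== Notes on version B (the rewrite author's own statement) =====
-- stated objective: simpler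
-- what changed: Replaced the linear head/tail recursion (which slices location[1:] at every step and nests concatenations) with a single iterative forward pass appending each kept character to an accumulator.
import Mathlib
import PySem

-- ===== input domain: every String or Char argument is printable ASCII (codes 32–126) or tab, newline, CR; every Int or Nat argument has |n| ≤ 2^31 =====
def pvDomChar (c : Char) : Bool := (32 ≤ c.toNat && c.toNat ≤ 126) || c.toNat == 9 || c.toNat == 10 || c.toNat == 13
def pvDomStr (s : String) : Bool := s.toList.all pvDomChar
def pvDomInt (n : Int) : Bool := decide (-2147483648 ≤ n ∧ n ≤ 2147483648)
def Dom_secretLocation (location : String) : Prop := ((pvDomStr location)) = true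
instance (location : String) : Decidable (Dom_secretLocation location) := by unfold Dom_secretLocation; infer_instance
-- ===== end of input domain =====

-- B replaces A's head/tail recursion with a single iterative forward pass over the characters (return value only).
-- ===== PORT A =====
def pvKeep (c : Char) : Bool := "abcdefghijklmnopqrstuvwxyz".toList.contains c || c == ' '

def secretLocationAux : List Char → List Char
  | [] => []
  | c :: rest =>
      if pvKeep c then c :: secretLocationAux rest
      else secretLocationAux rest

def secretLocation (location : String) : String :=
  String.mk (secretLocationAux location.toList)

-- ===== PORT B =====
def secretLocation_alt (location : String) : String :=
  String.mk (location.toList.foldl (fun acc c => if pvKeep c then acc ++ [c] else acc) [])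

-- ===== PRECONDITION & SPEC =====
def Spec_secretLocation (location : String) (out : String) : Prop := out = secretLocation_alt location
instance (location : String) (out : String) : Decidable (Spec_secretLocation location out) := by unfold Spec_secretLocation; infer_instance

-- ===== CLAIM (what is proved, stated in full; the proofs are below) =====
def Claim_equal_secretLocation : Prop := ∀ (location : String), Dom_secretLocation location → Spec_secretLocation location (secretLocation location)

-- ===== LEMMAS AND PROOFS =====

-- ===== VERDICT (by name: the statement is the Claim_ definition above) =====
theorem pvFoldl_aux (l : List Char) (acc : List Char) :
    l.foldl (fun acc c => if pvKeep c then acc ++ [c] else acc) acc = acc ++ secretLocationAux l := by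
  induction l generalizing acc with
  | nil => simp [secretLocationAux]
  | cons c rest ih =>
      simp only [List.foldl, secretLocationAux]
      by_cases h : pvKeep c <;> simp [h, ih]

theorem secretLocation_spec : Claim_equal_secretLocation := by
  intro location _
  unfold Spec_secretLocation secretLocation secretLocation_alt
  rw [pvFoldl_aux]
  simp
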